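-- pv_equiv track=rewrite | github.com/czimm203/advent-of-code | day3/day3.py | part2
-- ===== SOURCE A (Python) =====
-- def get_prio(a: str) -> int:
--     prio = ord(a)
--     if prio >= 97:
--         return prio-96
--     else:
--         return prio - 38
--
-- def find_badge(group: list[str]) -> str:
--     for char in group[0].strip():
--         if char in group[1].strip() and char in group[2].strip():
--             return char
--     return ""
--
-- def part2(lines: list[str]) -> int:
--     iters = int(len(lines)/3)
--
--     score = 0
--     for i in range(iters):
--         group = [lines[3*i], lines[3*i+1], lines[3*i+2]]
--         badge = find_badge(group)
--         score += get_prio(badge)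
--
--
--     return score
-- ===== SOURCE B (Python) =====
-- def part2(lines: list) -> int:
--     total = 0
--     it = iter(lines)
--     for g0, g1, g2 in zip(it, it, it):
--         # table keyed by the chars of the first line: first index there + seen-in flags
--         info = {}
--         for j, c in enumerate(g0.strip()):
--             if c not in info:
--                 info[c] = (j, False, False)
--         for c in g1.strip():
--             if c in info:
--                 j, _, b2 = info[c]
--                 info[c] = (j, True, b2)
--         for c in g2.strip():
--             if c in info:
--                 j, b1, _ = info[c]
--                 info[c] = (j, b1, True)
--         _, badge = min((j, c) for c, (j, b1, b2) in info.items() if b1 and b2)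
--         o = ord(badge)
--         total += (o - 96) if o >= 97 else (o - 38)
--     return total
-- ===== Notes on version B (the rewrite author's own statement) =====
-- stated objective: alternative
-- what changed: Per group B never tests 'char in g1 / char in g2': it builds a dict keyed by the first line's chars holding their first index and two seen-flags, fills the flags by one pass over each companion line, and picks the badge as the minimum (index, char) candidate; groups are consumed three at a time from one iterator (zip(it,it,it)) instead of A's range(len//3) index arithmetic.
-- outside the precondition, e.g. on part2(['ab', 'cd', 'ef']): A raises TypeError, B raises ValueError
import Mathlib
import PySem

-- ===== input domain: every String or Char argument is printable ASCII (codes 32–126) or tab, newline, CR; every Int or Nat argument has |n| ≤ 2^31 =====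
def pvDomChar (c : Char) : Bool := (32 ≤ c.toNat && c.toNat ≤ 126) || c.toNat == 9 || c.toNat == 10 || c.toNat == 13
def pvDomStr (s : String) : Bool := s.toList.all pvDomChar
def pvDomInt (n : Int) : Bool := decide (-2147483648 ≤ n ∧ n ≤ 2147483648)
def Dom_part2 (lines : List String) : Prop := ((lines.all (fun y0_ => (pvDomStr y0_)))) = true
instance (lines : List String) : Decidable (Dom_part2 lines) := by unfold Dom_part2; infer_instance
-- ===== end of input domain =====

-- B replaces A's per-char "char in g1 and char in g2" scans by a dict keyed by the first
-- line's chars (first index + two seen-flags filled by passes over g1 and g2) and selects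
-- the badge as the minimum (index, char) candidate (objective: alternative).


-- ===== PORT A =====
-- ord(a): a must be a single character; on "" Python raises TypeError (excluded by Pre_), 0 is a filler
def get_prio (a : String) : Int :=
  match a.toList with
  | [c] => let prio : Int := c.toNat
           if prio ≥ 97 then prio - 96 else prio - 38
  | _ => 0

def find_badge (group : List String) : String :=
  let g1 := PySem.Str.strip (PySem.List.pyGetD group 1 "")
  let g2 := PySem.Str.strip (PySem.List.pyGetD group 2 "")
  match (PySem.Str.strip (PySem.List.pyGetD group 0 "")).toList.find?
      (fun c => PySem.Str.isIn (String.ofList [c]) g1 && PySem.Str.isIn (String.ofList [c]) g2) with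
  | some c => String.ofList [c]
  | none => ""

def part2 (lines : List String) : Int :=
  -- iters = int(len(lines)/3): exact Nat division here (float division is exact for these lengths)
  let iters : Int := ((lines.length / 3 : Nat) : Int)
  (PySem.List.pyRange 0 iters 1).foldl (fun score i =>
    let group := [PySem.List.pyGetD lines (3*i) "",
                  PySem.List.pyGetD lines (3*i+1) "",
                  PySem.List.pyGetD lines (3*i+2) ""]
    score + get_prio (find_badge group)) 0

-- ===== PORT B =====
def prio_alt (c : Char) : Int :=
  let o : Int := c.toNat
  if o ≥ 97 then o - 96 else o - 38

-- for g0, g1, g2 in zip(it, it, it): one triple per step; info is the dict keyed by g0's stripped chars,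
-- holding (first index in g0, seen in g1, seen in g2); badge = min (index, char) candidate.
-- min(...) of an empty candidate set raises ValueError (excluded by Pre_; `total` is a filler).
def part2_alt_go (rest : List String) (total : Int) : Int :=
  match rest with
  | g0 :: g1 :: g2 :: rs =>
    let info0 : PySem.Dict Char (Int × Bool × Bool) :=
      (PySem.List.enumerate (PySem.Str.strip g0).toList 0).foldl
        (fun d p => if d.contains p.2 then d else d.insert p.2 (p.1, false, false))
        PySem.Dict.empty
    let info1 := (PySem.Str.strip g1).toList.foldl
        (fun d c => if d.contains c then
            let v := d.getD c (0, false, false); d.insert c (v.1, true, v.2.2)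
          else d) info0
    let info2 := (PySem.Str.strip g2).toList.foldl
        (fun d c => if d.contains c then
            let v := d.getD c (0, false, false); d.insert c (v.1, v.2.1, true)
          else d) info1
    let cands := (info2.items.filter (fun p => p.2.2.1 && p.2.2.2)).map (fun p => (p.2.1, p.1))
    match PySem.List.min2? cands Prod.fst Prod.snd with
    | some m => part2_alt_go rs (total + prio_alt m.2)
    | none => total
  | _ => total

def part2_alt (lines : List String) : Int := part2_alt_go lines 0

-- ===== PRECONDITION & SPEC =====
-- Pre_ excludes inputs where some 3-line group has no common character among the stripped
-- lines: there A raises TypeError (ord("")) and B raises ValueError (min of an empty sequence).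
def Pre_part2 (lines : List String) : Prop :=
  ∀ i ∈ List.range (lines.length / 3),
    ((PySem.Str.strip (lines.getD (3*i) "")).toList.any (fun c =>
      (PySem.Str.strip (lines.getD (3*i+1) "")).toList.contains c &&
      (PySem.Str.strip (lines.getD (3*i+2) "")).toList.contains c)) = true
instance (lines : List String) : Decidable (Pre_part2 lines) := by unfold Pre_part2; infer_instance

def pvWitness_part2 : List String := ["a", "a", "a"]

def Spec_part2 (lines : List String) (out : Int) : Prop := out = part2_alt lines
instance (lines : List String) (out : Int) : Decidable (Spec_part2 lines out) := by unfold Spec_part2; infer_instance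

-- ===== CLAIM (what is proved, stated in full; the proofs are below) =====
def Claim_equal_part2 : Prop := ∀ (lines : List String), Dom_part2 lines → Pre_part2 lines → Spec_part2 lines (part2 lines)

-- ===== LEMMAS AND PROOFS =====

-- `c in s` for a single character is list membership of c in s's characters
lemma isIn_singleton (c : Char) (s : String) :
    PySem.Str.isIn (String.ofList [c]) s = s.toList.contains c := by
  by_cases h : c ∈ s.toList
  · have hin : PySem.Str.isIn (String.ofList [c]) s = true := by
      rw [PySem.Str.isIn_iff_infix, String.toList_ofList]
      exact (List.singleton_infix_iff _ _).mpr h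
    rw [hin]; simp [h]
  · have hni : PySem.Str.isIn (String.ofList [c]) s = false := by
      cases hb : PySem.Str.isIn (String.ofList [c]) s
      · rfl
      · rw [PySem.Str.isIn_iff_infix, String.toList_ofList, List.singleton_infix_iff] at hb
        exact absurd hb h
    rw [hni]; simp [h]

-- A's loop body at index i
def fA (lines : List String) (i : Int) : Int :=
  get_prio (find_badge [PySem.List.pyGetD lines (3*i) "",
                        PySem.List.pyGetD lines (3*i+1) "",
                        PySem.List.pyGetD lines (3*i+2) ""])

lemma part2_eq_sum (lines : List String) :
    part2 lines = ((List.range (lines.length / 3)).map (fun k : Nat => fA lines (k : Int))).sum := by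
  unfold part2 fA
  rw [PySem.List.foldl_add, PySem.List.pyRange_one, List.map_map, zero_add]
  have harg : (((lines.length / 3 : Nat) : Int) - 0).toNat = lines.length / 3 := by omega
  rw [harg]
  exact congrArg List.sum (List.map_congr_left fun k _ => by simp)

lemma pyGetD_cons3 (a b c : String) (rs : List String) (m : Nat) :
    PySem.List.pyGetD (a :: b :: c :: rs) ((m : Int) + 3) "" = PySem.List.pyGetD rs (m : Int) "" := by
  have h3 : ((m : Int) + 3) = ((m + 3 : Nat) : Int) := by push_cast; ring
  rw [h3, PySem.List.pyGetD_natCast, PySem.List.pyGetD_natCast]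
  simp

lemma fA_shift (a b c : String) (rs : List String) (k : Nat) :
    fA (a :: b :: c :: rs) ((k : Int) + 1) = fA rs (k : Int) := by
  unfold fA
  have e0 : (3 : Int) * ((k : Int) + 1) = 3 * (k : Int) + 3 := by ring
  have e1 : (3 : Int) * ((k : Int) + 1) + 1 = (3 * (k : Int) + 1) + 3 := by ring
  have e2 : (3 : Int) * ((k : Int) + 1) + 2 = (3 * (k : Int) + 2) + 3 := by ring
  have c0 : (3 : Int) * (k : Int) = ((3 * k : Nat) : Int) := by push_cast; ring
  have c1 : (3 : Int) * (k : Int) + 1 = ((3 * k + 1 : Nat) : Int) := by push_cast; ring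
  have c2 : (3 : Int) * (k : Int) + 2 = ((3 * k + 2 : Nat) : Int) := by push_cast; ring
  rw [e2, e1, e0, c2, c1, c0, pyGetD_cons3, pyGetD_cons3, pyGetD_cons3]

-- A peels its first (three-line) group
lemma part2_cons3 (a b c : String) (rs : List String) :
    part2 (a :: b :: c :: rs) = get_prio (find_badge [a, b, c]) + part2 rs := by
  rw [part2_eq_sum, part2_eq_sum]
  have hl : (a :: b :: c :: rs).length / 3 = rs.length / 3 + 1 := by
    simp only [List.length_cons]; omega
  rw [hl, List.range_succ_eq_map]
  simp only [List.map_cons, List.map_map, List.sum_cons, Function.comp_def, Nat.cast_zero]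
  have h1 : fA (a :: b :: c :: rs) (0 : Int) = get_prio (find_badge [a, b, c]) := by
    norm_num [fA, PySem.List.pyGetD_ofNat', PySem.List.pyGetD_natCast]
  have h2 : List.map (fun x : Nat => fA (a :: b :: c :: rs) ((x.succ : Nat) : Int))
        (List.range (rs.length / 3))
      = List.map (fun k : Nat => fA rs (k : Int)) (List.range (rs.length / 3)) :=
    List.map_congr_left fun k _ => by
      have e : ((k.succ : Nat) : Int) = (k : Int) + 1 := by push_cast; ring
      rw [e, fA_shift]
  rw [h1, h2]

lemma part2_short (rs : List String) (h : rs.length < 3) : part2 rs = 0 := by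
  rw [part2_eq_sum]
  have : rs.length / 3 = 0 := by omega
  simp [this]

lemma pre_tail (a b c : String) (rs : List String) (h : Pre_part2 (a :: b :: c :: rs)) :
    Pre_part2 rs := by
  intro i hi
  simp only [List.mem_range] at hi
  have hl : (a :: b :: c :: rs).length / 3 = rs.length / 3 + 1 := by
    simp only [List.length_cons]; omega
  have hmain := h (i + 1) (by simp only [List.mem_range, hl]; omega)
  have g0 : (a :: b :: c :: rs).getD (3 * (i + 1)) "" = rs.getD (3 * i) "" := by
    have e : 3 * (i + 1) = (3 * i) + 1 + 1 + 1 := by ring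
    simp [e]
  have g1 : (a :: b :: c :: rs).getD (3 * (i + 1) + 1) "" = rs.getD (3 * i + 1) "" := by
    have e : 3 * (i + 1) + 1 = (3 * i + 1) + 1 + 1 + 1 := by ring
    simp [e]
  have g2 : (a :: b :: c :: rs).getD (3 * (i + 1) + 2) "" = rs.getD (3 * i + 2) "" := by
    have e : 3 * (i + 1) + 2 = (3 * i + 2) + 1 + 1 + 1 := by ring
    simp [e]
  rw [g0, g1, g2] at hmain
  exact hmain

lemma pre_head (a b c : String) (rs : List String) (h : Pre_part2 (a :: b :: c :: rs)) :
    ∃ x ∈ (PySem.Str.strip a).toList,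
      x ∈ (PySem.Str.strip b).toList ∧ x ∈ (PySem.Str.strip c).toList := by
  have hmain := h 0 (by simp only [List.mem_range, List.length_cons]; omega)
  simpa using hmain

-- ---- B-side dict characterizations ----

lemma keys_insert_of_contains {ν : Type} (d : PySem.Dict Char ν) (k : Char) (v : ν)
    (h : d.contains k = true) : (d.insert k v).keys = d.keys := by
  simp only [PySem.Dict.keys, PySem.Dict.items_insert_of_contains d v h, List.map_map]
  exact List.map_congr_left fun p _ => by by_cases hp : p.1 = k <;> simp [hp]

lemma info0_get? : ∀ (l : List Char) (s : Int) (d : PySem.Dict Char (Int × Bool × Bool)) (c : Char),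
    ((PySem.List.enumerate l s).foldl
        (fun d p => if d.contains p.2 then d else d.insert p.2 (p.1, false, false)) d).get? c
      = (d.get? c).or (if c ∈ l then some (s + (l.idxOf c : Int), false, false) else none) := by
  intro l
  induction l with
  | nil => intro s d c; simp [PySem.List.enumerate_nil]
  | cons x xs ih =>
    intro s d c
    rw [PySem.List.enumerate_cons, List.foldl_cons, ih]
    by_cases hc : c = x
    · subst hc
      by_cases hdx : d.contains c = true
      · obtain ⟨v, hv⟩ := Option.isSome_iff_exists.mp ((PySem.Dict.contains_eq_isSome_get? d c) ▸ hdx)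
        simp [hdx, hv]
      · have hnone : d.get? c = none := by
          cases hg : d.get? c
          · rfl
          · rw [PySem.Dict.contains_eq_isSome_get?, hg] at hdx; simp at hdx
        simp only [Bool.not_eq_true] at hdx
        simp [hdx, hnone, PySem.Dict.get?_insert_self]
    · have hne : c ≠ x := hc
      have hstep : (if d.contains x = true then d else d.insert x (s, false, false)).get? c = d.get? c := by
        split
        · rfl
        · exact PySem.Dict.get?_insert_of_ne d _ hne
      rw [hstep]
      have hmem : (c ∈ x :: xs) = (c ∈ xs) := by simp [hne]
      have hidx : c ∈ xs → (s + 1 + ((xs.idxOf c : Nat) : Int) = s + (((x :: xs).idxOf c : Nat) : Int)) := by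
        intro _
        rw [List.idxOf_cons_ne _ (by exact fun h => hne h.symm)]
        push_cast; ring
      by_cases hm : c ∈ xs
      · simp [hm, hne, ← hidx hm]
      · simp [hm, hne]


lemma info0_nodup : ∀ (l : List Char) (s : Int) (d : PySem.Dict Char (Int × Bool × Bool)),
    d.keys.Nodup →
    ((PySem.List.enumerate l s).foldl
        (fun d p => if d.contains p.2 then d else d.insert p.2 (p.1, false, false)) d).keys.Nodup := by
  intro l
  induction l with
  | nil => intro s d h; simpa [PySem.List.enumerate_nil] using h
  | cons x xs ih =>
    intro s d h
    rw [PySem.List.enumerate_cons, List.foldl_cons]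
    apply ih
    by_cases hdx : d.contains x = true
    · simpa [hdx] using h
    · have hx : x ∉ d.keys := by
        intro hm
        rw [PySem.Dict.contains_eq_decide_mem_keys] at hdx
        simp [hm] at hdx
      have : (d.insert x (s, false, false)).keys = d.keys ++ [x] := by
        simp [PySem.Dict.keys, PySem.Dict.items_insert_of_not_contains d _ (by simpa using hdx)]
      simp only [Bool.not_eq_true] at hdx
      simp [hdx, this, List.nodup_append, h]
      exact fun a ha he => hx (he ▸ ha)

lemma mark1_get? : ∀ (l : List Char) (d : PySem.Dict Char (Int × Bool × Bool)) (c : Char),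
    (l.foldl (fun d c => if d.contains c then
        let v := d.getD c (0, false, false); d.insert c (v.1, true, v.2.2)
      else d) d).get? c
      = if c ∈ l then (d.get? c).map (fun v => (v.1, true, v.2.2)) else d.get? c := by
  intro l
  induction l with
  | nil => intro d c; simp
  | cons x xs ih =>
    intro d c
    rw [List.foldl_cons, ih]
    by_cases hc : c = x
    · subst hc
      by_cases hdx : d.contains c = true
      · obtain ⟨v, hv⟩ := Option.isSome_iff_exists.mp ((PySem.Dict.contains_eq_isSome_get? d c) ▸ hdx)
        have hgd : d.getD c (0, false, false) = v := by simp [PySem.Dict.getD, hv]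
        by_cases hm : c ∈ xs <;>
          simp [hdx, hgd, hv, hm, PySem.Dict.get?_insert_self]
      · have hnone : d.get? c = none := by
          cases hg : d.get? c
          · rfl
          · rw [PySem.Dict.contains_eq_isSome_get?, hg] at hdx; simp at hdx
        by_cases hm : c ∈ xs <;> simp [hdx, hnone, hm]
    · have hne : c ≠ x := hc
      have hstep : (if d.contains x = true then
          let v := d.getD x (0, false, false); d.insert x (v.1, true, v.2.2) else d).get? c = d.get? c := by
        split
        · exact PySem.Dict.get?_insert_of_ne d _ hne
        · rfl
      rw [hstep]
      by_cases hm : c ∈ xs <;> simp [hm, hne]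

lemma mark1_keys : ∀ (l : List Char) (d : PySem.Dict Char (Int × Bool × Bool)),
    (l.foldl (fun d c => if d.contains c then
        let v := d.getD c (0, false, false); d.insert c (v.1, true, v.2.2)
      else d) d).keys = d.keys := by
  intro l
  induction l with
  | nil => intro d; simp
  | cons x xs ih =>
    intro d
    rw [List.foldl_cons, ih]
    by_cases hdx : d.contains x = true
    · simp only [hdx, if_pos]
      exact keys_insert_of_contains d x _ hdx
    · simp [hdx]

lemma min2_go : ∀ (xs : List (Int × Char)) (m : Int × Char),
    ∃ m', xs.foldl (fun acc x => match acc with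
        | none => some x
        | some mm => if (decide (x.1 < mm.1) || !decide (mm.1 < x.1) && decide (x.2 < mm.2)) = true
                     then some x else some mm) (some m) = some m'
      ∧ (m' = m ∨ m' ∈ xs) ∧ m'.1 ≤ m.1 ∧ ∀ y ∈ xs, m'.1 ≤ y.1 := by
  intro xs
  induction xs with
  | nil => intro m; exact ⟨m, rfl, Or.inl rfl, le_refl _, by simp⟩
  | cons x t ih =>
    intro m
    rw [List.foldl_cons]
    by_cases hcmp : (decide (x.1 < m.1) || !decide (m.1 < x.1) && decide (x.2 < m.2)) = true
    · simp only [hcmp, if_pos]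
      obtain ⟨m', h1, h2, h3, h4⟩ := ih x
      refine ⟨m', h1, ?_, ?_, ?_⟩
      · rcases h2 with h | h
        · exact Or.inr (h ▸ List.mem_cons_self)
        · exact Or.inr (List.mem_cons_of_mem _ h)
      · simp only [Bool.or_eq_true, Bool.and_eq_true, decide_eq_true_eq, Bool.not_eq_true',
          decide_eq_false_iff_not] at hcmp
        rcases hcmp with h | ⟨h, _⟩ <;> omega
      · intro y hy
        rcases List.mem_cons.mp hy with h | h
        · exact h ▸ h3
        · exact h4 y h
    · simp only [hcmp, if_neg, Bool.not_eq_true]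
      obtain ⟨m', h1, h2, h3, h4⟩ := ih m
      refine ⟨m', h1, ?_, h3, ?_⟩
      · rcases h2 with h | h
        · exact Or.inl h
        · exact Or.inr (List.mem_cons_of_mem _ h)
      · intro y hy
        rcases List.mem_cons.mp hy with h | h
        · subst h
          simp only [Bool.or_eq_true, Bool.and_eq_true, decide_eq_true_eq, Bool.not_eq_true',
            decide_eq_false_iff_not] at hcmp
          push Not at hcmp
          omega
        · exact h4 y h

lemma min2_spec (x : Int × Char) (rest : List (Int × Char)) :
    ∃ m, PySem.List.min2? (x :: rest) Prod.fst Prod.snd = some m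
      ∧ m ∈ x :: rest ∧ ∀ y ∈ x :: rest, m.1 ≤ y.1 := by
  obtain ⟨m', h1, h2, h3, h4⟩ := min2_go rest x
  refine ⟨m', ?_, ?_, ?_⟩
  · have hdef : PySem.List.min2? (x :: rest) Prod.fst Prod.snd
        = (x :: rest).foldl (fun acc x => match acc with
            | none => some x
            | some mm => if (decide (x.1 < mm.1) || !decide (mm.1 < x.1) && decide (x.2 < mm.2)) = true
                         then some x else some mm) none := by
      unfold PySem.List.min2?
      congr 1
      funext acc y
      cases acc <;> rfl
    rw [hdef, List.foldl_cons]
    exact h1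
  · rcases h2 with h | h
    · exact h ▸ List.mem_cons_self
    · exact List.mem_cons_of_mem _ h
  · intro y hy
    rcases List.mem_cons.mp hy with h | h
    · exact h ▸ h3
    · exact h4 y h

lemma find?_idxOf_le {p : Char → Bool} : ∀ (l : List Char) (a : Char), l.find? p = some a →
    ∀ b ∈ l, p b = true → l.idxOf a ≤ l.idxOf b := by
  intro l
  induction l with
  | nil => intro a h; simp at h
  | cons x xs ih =>
    intro a h b hb hpb
    by_cases hpx : p x = true
    · rw [List.find?_cons_of_pos hpx] at h
      cases h
      simp [List.idxOf_cons_self]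
    · rw [List.find?_cons_of_neg hpx] at h
      have hax : a ≠ x := by
        intro he
        exact hpx (he ▸ List.find?_some h)
      have hbx : b ≠ x := fun he => hpx (he ▸ hpb)
      have hbxs : b ∈ xs := by
        rcases List.mem_cons.mp hb with h' | h'
        · exact absurd h' hbx
        · exact h'
      rw [List.idxOf_cons_ne _ (fun he => hax he.symm), List.idxOf_cons_ne _ (fun he => hbx he.symm)]
      exact Nat.succ_le_succ (ih a h b hbxs hpb)
lemma mark2_get? : ∀ (l : List Char) (d : PySem.Dict Char (Int × Bool × Bool)) (c : Char),
    (l.foldl (fun d c => if d.contains c then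
        let v := d.getD c (0, false, false); d.insert c (v.1, v.2.1, true)
      else d) d).get? c
      = if c ∈ l then (d.get? c).map (fun v => (v.1, v.2.1, true)) else d.get? c := by
  intro l
  induction l with
  | nil => intro d c; simp
  | cons x xs ih =>
    intro d c
    rw [List.foldl_cons, ih]
    by_cases hc : c = x
    · subst hc
      by_cases hdx : d.contains c = true
      · obtain ⟨v, hv⟩ := Option.isSome_iff_exists.mp ((PySem.Dict.contains_eq_isSome_get? d c) ▸ hdx)
        have hgd : d.getD c (0, false, false) = v := by simp [PySem.Dict.getD, hv]
        by_cases hm : c ∈ xs <;>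
          simp [hdx, hgd, hv, hm, PySem.Dict.get?_insert_self]
      · have hnone : d.get? c = none := by
          cases hg : d.get? c
          · rfl
          · rw [PySem.Dict.contains_eq_isSome_get?, hg] at hdx; simp at hdx
        by_cases hm : c ∈ xs <;> simp [hdx, hnone, hm]
    · have hne : c ≠ x := hc
      have hstep : (if d.contains x = true then
          let v := d.getD x (0, false, false); d.insert x (v.1, v.2.1, true) else d).get? c = d.get? c := by
        split
        · exact PySem.Dict.get?_insert_of_ne d _ hne
        · rfl
      rw [hstep]
      by_cases hm : c ∈ xs <;> simp [hm, hne]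

lemma mark2_keys : ∀ (l : List Char) (d : PySem.Dict Char (Int × Bool × Bool)),
    (l.foldl (fun d c => if d.contains c then
        let v := d.getD c (0, false, false); d.insert c (v.1, v.2.1, true)
      else d) d).keys = d.keys := by
  intro l
  induction l with
  | nil => intro d; simp
  | cons x xs ih =>
    intro d
    rw [List.foldl_cons, ih]
    by_cases hdx : d.contains x = true
    · simp only [hdx, if_pos]
      exact keys_insert_of_contains d x _ hdx
    · simp [hdx]


lemma badge_min (g0s g1s g2s : List Char) (c0 : Char)
    (hf : g0s.find? (fun c => g1s.contains c && g2s.contains c) = some c0) :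
    ∃ j : Int, PySem.List.min2?
        (List.map (fun p => (p.2.1, p.1))
          (List.filter (fun p => p.2.2.1 && p.2.2.2)
            (PySem.Dict.items
              (List.foldl (fun d c => if d.contains c then
                  let v := d.getD c (0, false, false); d.insert c (v.1, v.2.1, true)
                else d)
                (List.foldl (fun d c => if d.contains c then
                    let v := d.getD c (0, false, false); d.insert c (v.1, true, v.2.2)
                  else d)
                  (List.foldl (fun d p => if d.contains p.2 then d else d.insert p.2 (p.1, false, false))
                    PySem.Dict.empty (PySem.List.enumerate g0s 0))
                  g1s)
                g2s))))
        Prod.fst Prod.snd = some (j, c0) := by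
  set info0 := List.foldl (fun d p => if d.contains p.2 then d else d.insert p.2 (p.1, false, false))
      PySem.Dict.empty (PySem.List.enumerate g0s 0) with hinfo0
  set info1 := List.foldl (fun d c => if d.contains c then
      let v := d.getD c (0, false, false); d.insert c (v.1, true, v.2.2) else d) info0 g1s with hinfo1
  set info2 := List.foldl (fun d c => if d.contains c then
      let v := d.getD c (0, false, false); d.insert c (v.1, v.2.1, true) else d) info1 g2s with hinfo2
  have hget : ∀ c, info2.get? c
      = if c ∈ g0s then some ((g0s.idxOf c : Int), decide (c ∈ g1s), decide (c ∈ g2s)) else none := by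
    intro c
    rw [hinfo2, mark2_get?, hinfo1, mark1_get?, hinfo0, info0_get?]
    simp only [PySem.Dict.get?_empty, Option.none_or, zero_add]
    by_cases h0 : c ∈ g0s <;> by_cases h1 : c ∈ g1s <;> by_cases h2 : c ∈ g2s <;>
      simp [h0, h1, h2]
  have hnd : info2.keys.Nodup := by
    rw [hinfo2, mark2_keys, hinfo1, mark1_keys, hinfo0]
    exact info0_nodup _ _ _ (by simp [PySem.Dict.keys_empty])
  have hmem : ∀ p : Int × Char,
      p ∈ ((info2.items.filter (fun p => p.2.2.1 && p.2.2.2)).map (fun p => (p.2.1, p.1)))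
      ↔ (p.2 ∈ g0s ∧ p.2 ∈ g1s ∧ p.2 ∈ g2s ∧ p.1 = (g0s.idxOf p.2 : Int)) := by
    intro p
    constructor
    · intro hp
      obtain ⟨q, hq, hqp⟩ := List.mem_map.mp hp
      obtain ⟨hqi, hqf⟩ := List.mem_filter.mp hq
      have hq2 : info2.get? q.1 = some q.2 :=
        (PySem.Dict.get?_eq_some_iff_mem_items info2 q.1 q.2 hnd).mpr hqi
      rw [hget q.1] at hq2
      by_cases h0 : q.1 ∈ g0s
      · rw [if_pos h0] at hq2
        have hq2' := Option.some.inj hq2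
        subst hqp
        simp only [Bool.and_eq_true] at hqf
        rw [← hq2'] at hqf ⊢
        simp only [decide_eq_true_eq] at hqf
        exact ⟨h0, hqf.1, hqf.2, rfl⟩
      · rw [if_neg h0] at hq2; exact absurd hq2 (by simp)
    · intro ⟨h0, h1, h2, hj⟩
      refine List.mem_map.mpr ⟨(p.2, (p.1, true, true)), ?_, rfl⟩
      refine List.mem_filter.mpr ⟨?_, by simp⟩
      refine (PySem.Dict.get?_eq_some_iff_mem_items info2 p.2 _ hnd).mp ?_
      rw [hget p.2, if_pos h0, hj]
      simp [h1, h2]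
  have hc0p := List.find?_some hf
  simp only [Bool.and_eq_true, List.contains_iff_mem] at hc0p
  have hc0g0 : c0 ∈ g0s := List.mem_of_find?_eq_some hf
  have hc0cand : ((g0s.idxOf c0 : Int), c0)
      ∈ ((info2.items.filter (fun p => p.2.2.1 && p.2.2.2)).map (fun p => (p.2.1, p.1))) :=
    (hmem _).mpr ⟨hc0g0, hc0p.1, hc0p.2, rfl⟩
  rcases hcands : ((info2.items.filter (fun p => p.2.2.1 && p.2.2.2)).map (fun p => (p.2.1, p.1))) with
    _ | ⟨x, rest⟩
  · rw [hcands] at hc0cand; simp at hc0cand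
  · obtain ⟨m, hmin, hm, hle⟩ := min2_spec x rest
    rw [← hcands] at hmin hm hle
    obtain ⟨hm0, hm1, hm2, hmj⟩ := (hmem m).mp hm
    -- m.1 ≤ idxOf c0
    have hle1 : m.1 ≤ (g0s.idxOf c0 : Int) := hle _ hc0cand
    -- idxOf c0 ≤ idxOf m.2
    have hle2 : g0s.idxOf c0 ≤ g0s.idxOf m.2 :=
      find?_idxOf_le g0s c0 hf m.2 hm0 (by simp [hm1, hm2])
    have heq : g0s.idxOf m.2 = g0s.idxOf c0 := by omega
    have hchar : m.2 = c0 := by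
      have h1' : g0s[g0s.idxOf m.2]'(List.idxOf_lt_length_of_mem hm0) = m.2 := List.getElem_idxOf _
      have h2' : g0s[g0s.idxOf c0]'(List.idxOf_lt_length_of_mem hc0g0) = c0 := List.getElem_idxOf _
      rw [← h1', ← h2']
      simp [heq]
    refine ⟨m.1, ?_⟩
    rw [hmin]
    congr 1
    exact (Prod.ext_iff).mpr ⟨rfl, hchar⟩

lemma go_eq_aux : ∀ (n : Nat) (rest : List String), rest.length ≤ n → ∀ (total : Int),
    Pre_part2 rest → part2_alt_go rest total = total + part2 rest := by
  intro n
  induction n with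
  | zero =>
    intro rest hle total _
    match rest, hle with
    | [], _ => rw [part2_short [] (by simp)]; simp [part2_alt_go]
  | succ n ihn =>
    intro rest hle total h
    match rest, hle with
    | [], _ => rw [part2_short [] (by simp)]; simp [part2_alt_go]
    | [a], _ => rw [part2_short [a] (by simp)]; simp [part2_alt_go]
    | [a, b], _ => rw [part2_short [a, b] (by simp)]; simp [part2_alt_go]
    | g0 :: g1 :: g2 :: rs, hle =>
      rw [part2_cons3]
      obtain ⟨x, hx0, hx1, hx2⟩ := pre_head g0 g1 g2 rs h
      have hpredeq : (fun c => PySem.Str.isIn (String.ofList [c]) (PySem.Str.strip g1)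
            && PySem.Str.isIn (String.ofList [c]) (PySem.Str.strip g2))
          = (fun c => (PySem.Str.strip g1).toList.contains c
            && (PySem.Str.strip g2).toList.contains c) := by
        funext c; rw [isIn_singleton, isIn_singleton]
      have hsome : ((PySem.Str.strip g0).toList.find? (fun c =>
          (PySem.Str.strip g1).toList.contains c && (PySem.Str.strip g2).toList.contains c)).isSome := by
        rw [List.find?_isSome]
        refine ⟨x, hx0, ?_⟩
        simp only [Bool.and_eq_true, List.contains_iff_mem]
        exact ⟨hx1, hx2⟩
      obtain ⟨c0, hc0⟩ := Option.isSome_iff_exists.mp hsome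
      obtain ⟨j, hmin⟩ := badge_min (PySem.Str.strip g0).toList (PySem.Str.strip g1).toList
        (PySem.Str.strip g2).toList c0 hc0
      have hfb : find_badge [g0, g1, g2] = String.ofList [c0] := by
        unfold find_badge
        simp only [PySem.List.pyGetD_ofNat', List.getD_cons_zero, List.getD_cons_succ]
        rw [hpredeq, hc0]
      have hprio : get_prio (find_badge [g0, g1, g2]) = prio_alt c0 := by
        rw [hfb]; simp [get_prio, prio_alt]
      have hstep : part2_alt_go (g0 :: g1 :: g2 :: rs) total
          = part2_alt_go rs (total + prio_alt c0) := by
        simp only [part2_alt_go]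
        rw [hmin]
      have hlen : rs.length ≤ n := by
        simp only [List.length_cons] at hle; omega
      rw [hstep, ihn rs hlen _ (pre_tail g0 g1 g2 rs h), hprio]
      ring

-- ===== VERDICT (by name: the statement is the Claim_ definition above) =====
theorem part2_spec : Claim_equal_part2 := by
  intro lines _ hpre
  unfold Spec_part2 part2_alt
  rw [go_eq_aux lines.length lines le_rfl 0 hpre, zero_add]
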